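-- pv_equiv track=rewrite | github.com/MRM-MB/LEVELUP | LevelUp_App/hardware/pico-w/main.py | get_block_text_dimensions
-- ===== SOURCE A (Python) =====
-- BLOCK_FONT_WIDTH = 5
--
-- BLOCK_FONT_HEIGHT = 7
--
-- BLOCK_FONT_SPACING = 1
--
-- BLOCK_FONT = {
--     "L": (
--         "1....",
--         "1....",
--         "1....",
--         "1....",
--         "1....",
--         "1....",
--         "11111",
--     ),
--     "E": (
--         "11111",
--         "1....",
--         "1....",
--         "11111",
--         "1....",
--         "1....",
--         "11111",
--     ),
--     "V": (
--         "1...1",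
--         "1...1",
--         "1...1",
--         "1...1",
--         "1...1",
--         ".1.1.",
--         "..1..",
--     ),
--     "U": (
--         "1...1",
--         "1...1",
--         "1...1",
--         "1...1",
--         "1...1",
--         "1...1",
--         "11111",
--     ),
--     "P": (
--         "11110",
--         "1...1",
--         "1...1",
--         "11110",
--         "1....",
--         "1....",
--         "1....",
--     ),
--     "!": (
--         "..1..",
--         "..1..",
--         "..1..",
--         "..1..",
--         "..1..",
--         ".....",
--         "..1..",
--     ),
-- }
--
-- def get_block_text_dimensions(text, scale=1, letter_spacing=None):
--     """Compute pixel width/height for block font text."""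
--     if scale <= 0:
--         scale = 1
--     spacing = BLOCK_FONT_SPACING if letter_spacing is None else letter_spacing
--     width = 0
--     length = len(text)
--     for index, char in enumerate(text):
--         glyph = BLOCK_FONT.get(char.upper())
--         if glyph:
--             width += BLOCK_FONT_WIDTH * scale
--         else:
--             width += 5 * scale
--         if index < length - 1:
--             width += spacing * scale
--     height = BLOCK_FONT_HEIGHT * scale
--     return width, height
-- ===== SOURCE B (Python) =====
-- BLOCK_FONT_WIDTH = 5
-- BLOCK_FONT_HEIGHT = 7
-- BLOCK_FONT_SPACING = 1
--
-- def get_block_text_dimensions(text, scale=1, letter_spacing=None):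
--     """Compute pixel width/height for block font text (closed form, no loop)."""
--     if scale <= 0:
--         scale = 1
--     spacing = BLOCK_FONT_SPACING if letter_spacing is None else letter_spacing
--     n = len(text)
--     width = (n * BLOCK_FONT_WIDTH + max(n - 1, 0) * spacing) * scale
--     return width, BLOCK_FONT_HEIGHT * scale
-- ===== Notes on version B (the rewrite author's own statement) =====
-- stated objective: faster
-- what changed: Replaced the per-character enumerate loop (whose two branches add the same 5*scale, so the glyph lookup is irrelevant to the result) by the closed form (n*5 + max(n-1,0)*spacing)*scale with constant height 7*scale.
import Mathlib
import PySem

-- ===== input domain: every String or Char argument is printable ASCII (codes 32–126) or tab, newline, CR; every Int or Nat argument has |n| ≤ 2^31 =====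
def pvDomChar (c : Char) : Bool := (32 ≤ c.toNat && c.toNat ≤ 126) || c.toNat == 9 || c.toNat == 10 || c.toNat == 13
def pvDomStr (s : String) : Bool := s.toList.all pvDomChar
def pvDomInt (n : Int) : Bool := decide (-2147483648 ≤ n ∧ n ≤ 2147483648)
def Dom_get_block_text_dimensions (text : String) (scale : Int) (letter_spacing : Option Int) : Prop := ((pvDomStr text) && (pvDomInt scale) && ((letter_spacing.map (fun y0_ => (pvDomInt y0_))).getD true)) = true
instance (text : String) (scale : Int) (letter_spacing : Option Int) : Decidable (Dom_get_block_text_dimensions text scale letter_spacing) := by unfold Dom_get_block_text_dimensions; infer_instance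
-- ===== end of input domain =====

-- B replaces A's per-character loop by a closed-form width formula; faster (O(1) arithmetic vs O(n) loop).

-- ===== PORT A =====
def BLOCK_FONT : PySem.Dict String (List String) := PySem.Dict.ofList [
  ("L", ["1....", "1....", "1....", "1....", "1....", "1....", "11111"]),
  ("E", ["11111", "1....", "1....", "11111", "1....", "1....", "11111"]),
  ("V", ["1...1", "1...1", "1...1", "1...1", "1...1", ".1.1.", "..1.."]),
  ("U", ["1...1", "1...1", "1...1", "1...1", "1...1", "1...1", "11111"]),
  ("P", ["11110", "1...1", "1...1", "11110", "1....", "1....", "1...."]),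
  ("!", ["..1..", "..1..", "..1..", "..1..", "..1..", ".....", "..1.."])]

def get_block_text_dimensions (text : String) (scale : Int) (letter_spacing : Option Int) : Int × Int :=
  let scale := if scale ≤ 0 then 1 else scale
  let spacing := letter_spacing.getD 1     -- BLOCK_FONT_SPACING = 1
  let cs := text.toList
  let length : Int := cs.length
  -- 'if glyph:' — glyph is None (falsy) or a nonempty tuple of rows (truthy): (get?).getD [] ≠ []
  let width := (PySem.List.enumerate cs 0).foldl (fun w (p : Int × Char) =>
      let w := if (BLOCK_FONT.get? (PySem.Str.upper (String.mk [p.2]))).getD [] ≠ [] then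
                 w + 5 * scale    -- BLOCK_FONT_WIDTH * scale
               else
                 w + 5 * scale
      if p.1 < length - 1 then w + spacing * scale else w) 0
  (width, 7 * scale)                       -- BLOCK_FONT_HEIGHT * scale

-- ===== PORT B =====
def get_block_text_dimensions_alt (text : String) (scale : Int) (letter_spacing : Option Int) : Int × Int :=
  let scale := if scale ≤ 0 then 1 else scale
  let spacing := letter_spacing.getD 1
  let n : Int := text.toList.length
  ((n * 5 + max (n - 1) 0 * spacing) * scale, 7 * scale)

-- ===== PRECONDITION & SPEC =====
def Spec_get_block_text_dimensions (text : String) (scale : Int) (letter_spacing : Option Int) (out : Int × Int) : Prop := out = get_block_text_dimensions_alt text scale letter_spacing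
instance (text : String) (scale : Int) (letter_spacing : Option Int) (out : Int × Int) : Decidable (Spec_get_block_text_dimensions text scale letter_spacing out) := by unfold Spec_get_block_text_dimensions; infer_instance

-- ===== CLAIM (what is proved, stated in full; the proofs are below) =====
def Claim_equal_get_block_text_dimensions : Prop := ∀ (text : String) (scale : Int) (letter_spacing : Option Int), Dom_get_block_text_dimensions text scale letter_spacing → Spec_get_block_text_dimensions text scale letter_spacing (get_block_text_dimensions text scale letter_spacing)

-- ===== LEMMAS AND PROOFS =====

-- The loop invariant: over the slice of enumerate starting at index `start`, A's fold adds
-- 5*s per character plus sp*s for each index below m ( = length-1 ).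
theorem gbtd_fold (s sp m : Int) (cs : List Char) : ∀ (start w : Int),
    (PySem.List.enumerate cs start).foldl (fun w (p : Int × Char) =>
      let w := if (BLOCK_FONT.get? (PySem.Str.upper (String.mk [p.2]))).getD [] ≠ [] then
                 w + 5 * s else w + 5 * s
      if p.1 < m then w + sp * s else w) w
    = w + (cs.length : Int) * (5 * s) + max 0 (min (cs.length : Int) (m - start)) * (sp * s) := by
  induction cs with
  | nil => intro start w; simp [PySem.List.enumerate_nil]
  | cons c rest ih =>
    intro start w
    rw [PySem.List.enumerate_cons, List.foldl_cons, ih (start + 1)]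
    simp only [ite_self, List.length_cons]
    push_cast
    by_cases h : start < m
    · rw [if_pos h]
      have hm : max 0 (min ((rest.length : Int) + 1) (m - start))
          = 1 + max 0 (min (rest.length : Int) (m - (start + 1))) := by omega
      rw [hm]; ring
    · rw [if_neg h]
      have hm : max 0 (min ((rest.length : Int) + 1) (m - start))
          = max 0 (min (rest.length : Int) (m - (start + 1))) := by omega
      rw [hm]; ring

-- ===== VERDICT (by name: the statement is the Claim_ definition above) =====
theorem get_block_text_dimensions_spec : Claim_equal_get_block_text_dimensions := by
  intro text scale letter_spacing _
  unfold Spec_get_block_text_dimensions get_block_text_dimensions get_block_text_dimensions_alt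
  simp only
  rw [gbtd_fold]
  have hn : (0 : Int) ≤ (text.toList.length : Int) := by positivity
  have hm : max 0 (min (text.toList.length : Int) ((text.toList.length : Int) - 1 - 0))
      = max ((text.toList.length : Int) - 1) 0 := by omega
  rw [hm]
  exact Prod.ext (by ring) rfl
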